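-- pv_equiv track=rewrite | github.com/jiki-education/front-end | curriculum/src/exercises/matching-socks/solution.py | starts_with
-- ===== SOURCE A (Python) =====
-- def length(s):
--     counter = 0
--     for char in s:
--         counter = counter + 1
--     return counter
--
-- def starts_with(s, substr):
--     if length(s) < length(substr):
--         return False
--
--     counter = 0
--     for char in substr:
--         if s[counter] != char:
--             return False
--         counter = counter + 1
--
--     return True
-- ===== SOURCE B (Python) =====
-- def starts_with(s, substr):
--     return s[:len(substr)] == substr
-- ===== Notes on version B (the rewrite author's own statement) =====
-- stated objective: idiomatic
-- what changed: B replaces the hand-rolled length helper and the indexed per-character comparison loop (with its separate length guard) by a single slice-and-compare: s[:len(substr)] == substr; the too-short case falls out of the slice length, no explicit guard or loop.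
import Mathlib
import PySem

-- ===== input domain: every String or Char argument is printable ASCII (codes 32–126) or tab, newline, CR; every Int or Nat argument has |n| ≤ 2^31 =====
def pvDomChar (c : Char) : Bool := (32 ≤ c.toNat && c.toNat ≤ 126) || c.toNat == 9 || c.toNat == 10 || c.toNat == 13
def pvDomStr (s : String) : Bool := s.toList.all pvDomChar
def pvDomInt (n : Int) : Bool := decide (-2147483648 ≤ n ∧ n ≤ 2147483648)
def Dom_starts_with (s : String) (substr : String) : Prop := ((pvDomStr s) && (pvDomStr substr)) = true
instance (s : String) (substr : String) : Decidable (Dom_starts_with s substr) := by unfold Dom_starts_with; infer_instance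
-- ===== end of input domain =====

-- B replaces the hand-rolled length helper, the explicit length guard and the indexed
-- per-character loop by a single slice-and-compare (idiomatic; not claimed faster).

-- ===== PORT A =====
-- helper `length`: counts characters with a fold (the Python for-loop accumulator)
def pvLenA (s : List Char) : Int := s.foldl (fun c _ => c + 1) 0

-- the `for char in substr` loop of A: counter-indexed comparison; `none` from pyGet?
-- would be an IndexError, unreachable under the length guard
def pvLoopA (s : List Char) : List Char → Int → Bool
  | [], _ => true
  | c :: rest, counter =>
    match PySem.List.pyGet? s counter with
    | none => false
    | some ch => if ch ≠ c then false else pvLoopA s rest (counter + 1)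

def starts_with (s : String) (substr : String) : Bool :=
  if pvLenA s.toList < pvLenA substr.toList then false
  else pvLoopA s.toList substr.toList 0

-- ===== PORT B =====
-- s[:len(substr)] == substr : slice with nonnegative stop = take of len(substr) code points
def starts_with_alt (s : String) (substr : String) : Bool :=
  decide (s.toList.take substr.toList.length = substr.toList)

-- ===== PRECONDITION & SPEC =====
def Spec_starts_with (s : String) (substr : String) (out : Bool) : Prop := out = starts_with_alt s substr
instance (s : String) (substr : String) (out : Bool) : Decidable (Spec_starts_with s substr out) := by unfold Spec_starts_with; infer_instance

-- ===== CLAIM (what is proved, stated in full; the proofs are below) =====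
def Claim_equal_starts_with : Prop := ∀ (s : String) (substr : String), Dom_starts_with s substr → Spec_starts_with s substr (starts_with s substr)

-- ===== LEMMAS AND PROOFS =====
theorem pvLenA_aux (l : List Char) : ∀ n : Int, l.foldl (fun c _ => c + 1) n = n + l.length := by
  induction l with
  | nil => intro n; simp
  | cons c rest ih => intro n; simp [List.foldl, ih]; omega

theorem pvLenA_eq (l : List Char) : pvLenA l = l.length := by
  simpa using pvLenA_aux l 0

theorem pvLoopA_eq (sub : List Char) : ∀ (s : List Char) (k : Nat),
    pvLoopA s sub (k : Int) = decide ((s.drop k).take sub.length = sub) := by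
  induction sub with
  | nil => intro s k; simp [pvLoopA]
  | cons c rest ih =>
    intro s k
    by_cases h : k < s.length
    · have hget : PySem.List.pyGet? s (k : Int) = some s[k] := by
        simp [PySem.List.pyGet?_natCast, List.getElem?_eq_getElem h]
      have hdrop : s.drop k = s[k] :: s.drop (k + 1) := List.drop_eq_getElem_cons h
      have step : pvLoopA s (c :: rest) (k : Int)
          = if s[k] ≠ c then false else pvLoopA s rest ((k : Int) + 1) := by
        simp only [pvLoopA, hget]
      have irec : pvLoopA s rest ((k : Int) + 1)
          = decide ((s.drop (k + 1)).take rest.length = rest) := by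
        have := ih s (k + 1); push_cast at this; exact this
      by_cases hc : s[k] = c
      · rw [step, if_neg (by simp [hc]), irec, hdrop]
        simp [hc, List.take_succ_cons]
      · rw [step, if_pos hc, hdrop]
        simp only [List.length_cons, List.take_succ_cons]
        exact (decide_eq_false (fun he => hc (List.cons.inj he).1)).symm
    · have hget : PySem.List.pyGet? s (k : Int) = none := by
        rw [PySem.List.pyGet?_natCast]
        exact List.getElem?_eq_none (by omega)
      have hdrop : s.drop k = [] := List.drop_eq_nil_of_le (by omega)
      simp only [pvLoopA, hget, hdrop]
      simp

theorem key_lists (l t : List Char) :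
    (if pvLenA l < pvLenA t then false else pvLoopA l t 0)
      = decide (l.take t.length = t) := by
  rw [pvLenA_eq, pvLenA_eq]
  by_cases h : (l.length : Int) < (t.length : Int)
  · rw [if_pos h]
    have hne : l.take t.length ≠ t := by
      intro he
      have := congrArg List.length he
      simp at this
      omega
    simp [hne]
  · rw [if_neg h]
    simpa using pvLoopA_eq t l 0

-- ===== VERDICT (by name: the statement is the Claim_ definition above) =====
theorem starts_with_spec : Claim_equal_starts_with := by
  intro s substr _
  unfold Spec_starts_with starts_with starts_with_alt
  exact key_lists s.toList substr.toList
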